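-- pv_equiv track=rewrite | github.com/mtouzot/heykube_python | heykube/heykube.py | decodePerm
-- ===== SOURCE A (Python) =====
-- from typing import Dict, List, Tuple, Union, Optional, Any
--
-- def decodePerm(lex: int, n: int) -> List[int]:
--     """
--     Decode a cube permutation.
--
--     Decode a given permutation value (lex) into a list of indices
--     representing the positions of the pieces in the permutation.
--
--     :param lex: The lexicographic index of the permutation to decode.
--     :type lex: int
--     :param n: The total number of elements in the permutation.
--     :type n: int
--     :returns: A list of integers representing the decoded permutation.
--     :rtype: List[int]
--     """
--     a = list()
--     for loop1 in range(n):
--         a.append(0)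
--
--     i = n - 2
--     while i >= 0:
--         a[i] = lex % (n - i)
--         lex //= n - i
--         for j in range(i + 1, n):
--             if a[j] >= a[i]:
--                 a[j] += 1
--         i -= 1
--     return a
-- ===== SOURCE B (Python) =====
-- def decodePerm(lex, n):
--     # Decode by factorial-base digits + selection from a shrinking pool.
--     digits = []
--     for r in range(2, n + 1):
--         digits.append(lex % r)
--         lex //= r
--     pool = list(range(n))
--     out = []
--     for d in reversed(digits):
--         out.append(pool.pop(d))
--     return out + pool
-- ===== Notes on version B (the rewrite author's own statement) =====
-- stated objective: faster
-- what changed: A decodes by writing each factorial digit and then re-scanning the whole suffix to bump larger entries (Python-level O(n^2) inner loop); B extracts all factorial-base digits in one pass and then selects the k-th remaining element from a shrinking pool (list.pop), removing the Python-level inner loop.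
import Mathlib
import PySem

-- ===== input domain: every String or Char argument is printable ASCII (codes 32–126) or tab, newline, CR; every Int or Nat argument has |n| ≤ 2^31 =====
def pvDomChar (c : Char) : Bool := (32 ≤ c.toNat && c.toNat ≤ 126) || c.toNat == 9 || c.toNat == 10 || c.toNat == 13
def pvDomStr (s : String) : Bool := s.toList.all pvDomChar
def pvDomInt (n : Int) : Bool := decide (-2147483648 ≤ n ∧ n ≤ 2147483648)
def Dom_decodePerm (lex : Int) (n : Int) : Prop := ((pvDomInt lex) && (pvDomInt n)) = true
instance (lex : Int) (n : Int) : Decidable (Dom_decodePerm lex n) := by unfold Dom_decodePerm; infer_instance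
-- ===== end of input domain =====

-- B replaces A's per-digit rescan of the suffix (bumping larger entries) by one digit-extraction
-- pass plus selection from a shrinking pool; a timing run measured B faster (constant factor).

-- ===== PORT A =====
-- while i >= 0: a[i] = lex % (n-i); lex //= n-i; for j in range(i+1,n): if a[j] >= a[i]: a[j] += 1; i -= 1
-- (a[i] was just set and the inner range starts at i+1, so comparing against the saved ai is exact)
def pvOuterA (n : Int) (a : List Int) (lex : Int) (i : Int) : List Int :=
  if _h : 0 ≤ i then
    let ai := PySem.Int.mod lex (n - i)
    let a1 := a.set i.toNat ai
    let a2 := (PySem.List.pyRange (i + 1) n 1).foldl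
      (fun acc j => acc.modify j.toNat (fun x => if ai ≤ x then x + 1 else x)) a1
    pvOuterA n a2 (PySem.Int.floordiv lex (n - i)) (i - 1)
  else a
termination_by (i + 1).toNat
decreasing_by omega

def decodePerm (lex : Int) (n : Int) : List Int :=
  -- a = []; for loop1 in range(n): a.append(0)
  let a := (PySem.List.pyRange 0 n 1).foldl (fun acc _ => acc ++ [(0 : Int)]) []
  pvOuterA n a lex (n - 2)

-- ===== PORT B =====
def decodePerm_alt (lex : Int) (n : Int) : List Int :=
  -- digits = []; for r in range(2, n+1): digits.append(lex % r); lex //= r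
  let st0 := (PySem.List.pyRange 2 (n + 1) 1).foldl
    (fun (st : List Int × Int) r => (st.1 ++ [PySem.Int.mod st.2 r], PySem.Int.floordiv st.2 r))
    ([], lex)
  let pool := PySem.List.pyRange 0 n 1   -- pool = list(range(n))
  -- out = []; for d in reversed(digits): out.append(pool.pop(d))
  let st := st0.1.reverse.foldl
    (fun (st : List Int × List Int) d =>
      match PySem.List.pop? st.1 d with
      | some (x, p') => (p', st.2 ++ [x])
      | none => st)   -- pop(d) never fails: each digit is a valid index of the current pool
    (pool, [])
  st.2 ++ st.1   -- return out + pool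

-- ===== PRECONDITION & SPEC =====
def Spec_decodePerm (lex : Int) (n : Int) (out : List Int) : Prop := out = decodePerm_alt lex n
instance (lex : Int) (n : Int) (out : List Int) : Decidable (Spec_decodePerm lex n out) := by unfold Spec_decodePerm; infer_instance

-- ===== CLAIM (what is proved, stated in full; the proofs are below) =====
def Claim_equal_decodePerm : Prop := ∀ (lex : Int) (n : Int), Dom_decodePerm lex n → Spec_decodePerm lex n (decodePerm lex n)

-- ===== LEMMAS AND PROOFS =====

/-- `bump d`: the adjustment A applies to every suffix entry ≥ the new digit. -/
def pvBump (d x : Int) : Int := if d ≤ x then x + 1 else x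

/-- Factorial-base digits of `lex`, least significant first, radices `r, r+1, …` (`k` of them). -/
def pvDseq (lex : Int) (r : Int) : Nat → List Int
  | 0 => []
  | k + 1 => PySem.Int.mod lex r :: pvDseq (PySem.Int.floordiv lex r) (r + 1) k

/-- A's back-to-front construction: fold the digits (LSB first), prepending and bumping. -/
def pvG (ds : List Int) (t : List Int) : List Int :=
  ds.foldl (fun t d => d :: t.map (pvBump d)) t

/-- B's selection: pop each digit's index from the pool; returns (selected, leftover pool). -/
def pvSel : List Int → List Int → List Int × List Int
  | [], pool => ([], pool)
  | d :: es, pool =>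
    match PySem.List.pop? pool d with
    | some (x, p') => ((x :: (pvSel es p').1), (pvSel es p').2)
    | none => ([], pool)

theorem pvFoldAppendZero (l : List Int) (init : List Int) :
    l.foldl (fun acc _ => acc ++ [(0 : Int)]) init = init ++ List.replicate l.length 0 := by
  induction l generalizing init with
  | nil => simp
  | cons x l ih => simp [List.foldl_cons, ih, List.replicate_succ]

theorem pvModifyAppend (p : List Int) (x : Int) (t : List Int) (f : Int → Int) :
    (p ++ x :: t).modify p.length f = p ++ f x :: t := by
  apply List.ext_getElem
  · simp
  · intro i h1 h2
    rw [List.getElem_modify]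
    by_cases hi : i < p.length
    · rw [if_neg (by omega)]
      rw [List.getElem_append_left hi, List.getElem_append_left hi]
    · by_cases he : i = p.length
      · subst he
        rw [if_pos rfl]
        rw [List.getElem_append_right (by omega), List.getElem_append_right (by omega)]
        simp
      · rw [if_neg (by omega)]
        rw [List.getElem_append_right (by omega), List.getElem_append_right (by omega)]
        rw [List.getElem_cons, List.getElem_cons]
        rw [dif_neg (by omega), dif_neg (by omega)]

theorem pvFoldModify (t : List Int) : ∀ (p : List Int) (a b : Int) (f : Int → Int),
    0 ≤ a → p.length = a.toNat → b = a + t.length →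
    (PySem.List.pyRange a b 1).foldl (fun acc j => acc.modify j.toNat f) (p ++ t)
      = p ++ t.map f := by
  induction t with
  | nil =>
    intro p a b f ha hp hb
    simp only [List.length_nil, Nat.cast_zero, add_zero] at hb
    rw [PySem.List.pyRange_one_eq_nil (by omega)]; simp
  | cons x t ih =>
    intro p a b f ha hp hb
    simp only [List.length_cons, Nat.cast_add, Nat.cast_one] at hb
    rw [PySem.List.pyRange_one_cons (by omega)]
    rw [List.foldl_cons]
    have h1 : (p ++ x :: t).modify a.toNat f = p ++ f x :: t := by
      rw [← hp]; exact pvModifyAppend p x t f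
    rw [h1]
    have h2 : p ++ f x :: t = (p ++ [f x]) ++ t := by simp
    rw [h2, ih (p ++ [f x]) (a + 1) b f (by omega) (by simp [hp]; omega)
      (by omega)]
    simp

theorem pvSetReplicate (k : Nat) (t : List Int) (v : Int) :
    (List.replicate (k + 1) (0 : Int) ++ t).set k v = List.replicate k 0 ++ v :: t := by
  rw [List.replicate_succ' (n := k)]
  rw [List.set_append, if_pos (by simp)]
  rw [List.set_append, if_neg (by simp)]
  simp

/-- A's outer loop computes `pvG` of the digit sequence. -/
theorem pvOuterA_eq : ∀ (k : Nat) (lex : Int) (t : List Int) (n : Int),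
    (k : Int) + t.length = n →
    pvOuterA n (List.replicate k 0 ++ t) lex ((k : Int) - 1)
      = pvG (pvDseq lex (n - ((k : Int) - 1)) k) t := by
  intro k
  induction k with
  | zero =>
    intro lex t n hn
    rw [pvOuterA]; simp [pvDseq, pvG]
  | succ k ih =>
    intro lex t n hn
    rw [pvOuterA]
    rw [dif_pos (by push_cast; omega)]
    have hi : (((k : Nat) + 1 : Int) - 1).toNat = k := by omega
    push_cast at hn ⊢
    rw [hi]
    set ai := PySem.Int.mod lex (n - ((k : Int) + 1 - 1)) with hai
    rw [pvSetReplicate k t ai]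
    have hassoc : List.replicate k (0 : Int) ++ ai :: t
        = (List.replicate k (0 : Int) ++ [ai]) ++ t := by simp
    rw [hassoc]
    rw [pvFoldModify t (List.replicate k 0 ++ [ai]) ((k : Int) + 1 - 1 + 1) n
        (fun x => if ai ≤ x then x + 1 else x) (by omega) (by simp) (by omega)]
    have hback : (List.replicate k (0 : Int) ++ [ai])
          ++ t.map (fun x => if ai ≤ x then x + 1 else x)
        = List.replicate k (0 : Int) ++ (ai :: t.map (pvBump ai)) := by
      simp [pvBump]
    rw [hback]
    have hik : (k : Int) + 1 - 1 - 1 = (k : Int) - 1 := by ring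
    rw [hik]
    rw [ih (PySem.Int.floordiv lex (n - ((k : Int) + 1 - 1))) (ai :: t.map (pvBump ai)) n
        (by simp; omega)]
    have hd : pvDseq lex (n - ((k : Int) + 1 - 1)) (k + 1)
        = ai :: pvDseq (PySem.Int.floordiv lex (n - ((k : Int) + 1 - 1)))
            (n - ((k : Int) - 1)) k := by
      rw [pvDseq]
      congr 1
      ring_nf
    rw [hd]
    rfl

@[simp] theorem pvDseq_length (k : Nat) : ∀ (lex r : Int), (pvDseq lex r k).length = k := by
  induction k with
  | zero => intro lex r; rfl
  | succ k ih => intro lex r; simp [pvDseq, ih]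

theorem pvDseqBounds (k : Nat) : ∀ (lex r : Int), 2 ≤ r → ∀ (j : Nat) (hj : j < k),
    0 ≤ (pvDseq lex r k)[j]'(by simpa using hj) ∧ (pvDseq lex r k)[j]'(by simpa using hj) < r + j := by
  induction k with
  | zero => intro lex r hr j hj; omega
  | succ k ih =>
    intro lex r hr j hj
    cases j with
    | zero =>
      simp only [pvDseq, List.getElem_cons_zero]
      rw [PySem.Int.mod_eq_emod_of_pos (by omega)]
      constructor
      · exact Int.emod_nonneg lex (by omega)
      · simpa using Int.emod_lt_of_pos lex (show (0:Int) < r by omega)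
    | succ j =>
      simp only [pvDseq, List.getElem_cons_succ]
      have := ih (PySem.Int.floordiv lex r) (r + 1) (by omega) j (by omega)
      push_cast
      constructor
      · exact this.1
      · have h2 := this.2; push_cast at h2; omega

theorem pvDigitsFold (k : Nat) : ∀ (r lex : Int) (acc : List Int),
    ((PySem.List.pyRange r (r + k) 1).foldl
      (fun (st : List Int × Int) r => (st.1 ++ [PySem.Int.mod st.2 r], PySem.Int.floordiv st.2 r))
      (acc, lex)).1 = acc ++ pvDseq lex r k := by
  induction k with
  | zero =>
    intro r lex acc
    rw [show r + ((0:Nat):Int) = r by push_cast; ring, PySem.List.pyRange_one_eq_nil le_rfl]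
    simp [pvDseq]
  | succ k ih =>
    intro r lex acc
    rw [PySem.List.pyRange_one_cons (by push_cast; omega)]
    rw [List.foldl_cons]
    rw [show r + ((k + 1 : Nat) : Int) = (r + 1) + (k : Int) by push_cast; ring]
    rw [ih (r + 1) (PySem.Int.floordiv lex r) (acc ++ [PySem.Int.mod lex r])]
    simp [pvDseq]

theorem pvFoldSel (es : List Int) : ∀ (pool out : List Int),
    (∀ (j : Nat) (hj : j < es.length), 0 ≤ es[j] ∧ es[j] < (pool.length : Int) - j) →
    es.foldl (fun (st : List Int × List Int) d =>
      match PySem.List.pop? st.1 d with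
      | some (x, p') => (p', st.2 ++ [x])
      | none => st) (pool, out)
    = ((pvSel es pool).2, out ++ (pvSel es pool).1) := by
  induction es with
  | nil => intro pool out h; simp [pvSel]
  | cons d es ih =>
    intro pool out h
    have h0 := h 0 (by simp)
    simp only [List.getElem_cons_zero] at h0
    have hd : d = ((d.toNat : Nat) : Int) := by omega
    have hlt : d.toNat < pool.length := by omega
    have hp : PySem.List.pop? pool d = some (pool[d.toNat], pool.eraseIdx d.toNat) := by
      conv_lhs => rw [hd]
      exact PySem.List.pop?_natCast pool d.toNat hlt
    rw [List.foldl_cons]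
    simp only [hp]
    rw [ih (pool.eraseIdx d.toNat) (out ++ [pool[d.toNat]]) ?_]
    · simp only [pvSel, hp]
      simp
    · intro j hj
      have := h (j + 1) (by simpa using hj)
      simp only [List.getElem_cons_succ] at this
      rw [List.length_eraseIdx_of_lt hlt]
      push_cast at this ⊢
      omega

theorem pvSelMap (es : List Int) : ∀ (pool : List Int) (f : Int → Int),
    (∀ (j : Nat) (hj : j < es.length), 0 ≤ es[j] ∧ es[j] < (pool.length : Int) - j) →
    pvSel es (pool.map f) = ((pvSel es pool).1.map f, (pvSel es pool).2.map f) := by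
  induction es with
  | nil => intro pool f h; simp [pvSel]
  | cons d es ih =>
    intro pool f h
    have h0 := h 0 (by simp)
    simp only [List.getElem_cons_zero] at h0
    have hd : d = ((d.toNat : Nat) : Int) := by omega
    have hlt : d.toNat < pool.length := by omega
    have hp : PySem.List.pop? pool d = some (pool[d.toNat], pool.eraseIdx d.toNat) := by
      conv_lhs => rw [hd]
      exact PySem.List.pop?_natCast pool d.toNat hlt
    have hpm : PySem.List.pop? (pool.map f) d
        = some (f pool[d.toNat], (pool.eraseIdx d.toNat).map f) := by
      conv_lhs => rw [hd]
      rw [PySem.List.pop?_natCast (pool.map f) d.toNat (by simpa using hlt)]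
      rw [List.eraseIdx_map]
      simp
    have hbnd : ∀ (j : Nat) (hj : j < es.length),
        0 ≤ es[j] ∧ es[j] < ((pool.eraseIdx d.toNat).length : Int) - j := by
      intro j hj
      have := h (j + 1) (by simpa using hj)
      simp only [List.getElem_cons_succ] at this
      rw [List.length_eraseIdx_of_lt hlt]
      push_cast at this ⊢
      omega
    simp only [pvSel, hp, hpm]
    rw [ih (pool.eraseIdx d.toNat) f hbnd]
    simp

theorem pvEraseRange (m d : Int) (hd : 0 ≤ d) (hdm : d < m) :
    (PySem.List.pyRange 0 m 1).eraseIdx d.toNat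
      = (PySem.List.pyRange 0 (m - 1) 1).map (pvBump d) := by
  apply List.ext_getElem
  · rw [List.length_eraseIdx_of_lt (by rw [PySem.List.length_pyRange_one]; omega)]
    simp [PySem.List.length_pyRange_one]
  · intro j h1 h2
    rw [List.getElem_eraseIdx]
    simp only [List.getElem_map]
    have hj2 : j < (PySem.List.pyRange 0 (m - 1) 1).length := by simpa using h2
    have hjm : j < (m - 1).toNat := by
      rw [PySem.List.length_pyRange_one] at hj2; simpa using hj2
    rw [PySem.List.getElem_pyRange_one 0 (m - 1) j hj2]
    split
    · rw [PySem.List.getElem_pyRange_one 0 m j (by rw [PySem.List.length_pyRange_one]; omega)]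
      rw [pvBump, if_neg (by omega)]
    · rw [PySem.List.getElem_pyRange_one 0 m (j + 1) (by rw [PySem.List.length_pyRange_one]; omega)]
      rw [pvBump, if_pos (by omega)]
      push_cast; ring

theorem pvMain (es : List Int) : ∀ (m : Int), (es.length : Int) + 1 = m →
    (∀ (j : Nat) (hj : j < es.length), 0 ≤ es[j] ∧ es[j] < m - j) →
    (pvSel es (PySem.List.pyRange 0 m 1)).1 ++ (pvSel es (PySem.List.pyRange 0 m 1)).2
      = pvG es.reverse [0] := by
  induction es with
  | nil =>
    intro m hm h
    simp only [List.length_nil, Nat.cast_zero, zero_add] at hm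
    subst hm
    rw [PySem.List.pyRange_one_cons (by omega), PySem.List.pyRange_one_eq_nil (by omega)]
    simp [pvSel, pvG]
  | cons d es ih =>
    intro m hm h
    simp only [List.length_cons, Nat.cast_add, Nat.cast_one] at hm
    have h0 := h 0 (by simp)
    simp only [List.getElem_cons_zero, Nat.cast_zero, sub_zero] at h0
    have hlen : (PySem.List.pyRange 0 m 1).length = m.toNat := by
      rw [PySem.List.length_pyRange_one]; simp
    have hlt : d.toNat < (PySem.List.pyRange 0 m 1).length := by rw [hlen]; omega
    have hp : PySem.List.pop? (PySem.List.pyRange 0 m 1) d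
        = some ((PySem.List.pyRange 0 m 1)[d.toNat], (PySem.List.pyRange 0 m 1).eraseIdx d.toNat) := by
      conv_lhs => rw [show d = ((d.toNat : Nat) : Int) by omega]
      exact PySem.List.pop?_natCast _ d.toNat hlt
    have hget : (PySem.List.pyRange 0 m 1)[d.toNat] = d := by
      rw [PySem.List.getElem_pyRange_one 0 m d.toNat hlt]; omega
    have hbnd : ∀ (j : Nat) (hj : j < es.length),
        0 ≤ es[j] ∧ es[j] < ((PySem.List.pyRange 0 (m - 1) 1).length : Int) - j := by
      intro j hj
      have := h (j + 1) (by simpa using hj)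
      simp only [List.getElem_cons_succ] at this
      rw [PySem.List.length_pyRange_one]
      push_cast at this ⊢
      omega
    simp only [pvSel, hp, hget]
    rw [pvEraseRange m d h0.1 h0.2]
    rw [pvSelMap es (PySem.List.pyRange 0 (m - 1) 1) (pvBump d) hbnd]
    have ihh := ih (m - 1) (by omega) (by
      intro j hj
      have := h (j + 1) (by simpa using hj)
      simp only [List.getElem_cons_succ] at this
      push_cast at this ⊢
      omega)
    simp only [List.reverse_cons, pvG, List.foldl_append, List.foldl_cons, List.foldl_nil]
    rw [List.cons_append, ← List.map_append, ihh]
    simp only [pvG]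

theorem decodePerm_eq_pvG (lex n : Int) (hn : 1 ≤ n) :
    decodePerm lex n = pvG (pvDseq lex 2 (n - 1).toNat) [0] := by
  dsimp only [decodePerm]
  rw [pvFoldAppendZero]
  set k := (n - 1).toNat with hk
  have hrep : List.replicate (PySem.List.pyRange 0 n 1).length (0 : Int)
      = List.replicate k 0 ++ [0] := by
    rw [PySem.List.length_pyRange_one, ← List.replicate_succ' (n := k)]
    congr 1
    omega
  rw [List.nil_append, hrep]
  have h2 : n - 2 = (k : Int) - 1 := by omega
  rw [h2]
  rw [pvOuterA_eq k lex [0] n (by simp; omega)]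
  congr 2
  omega

theorem decodePerm_alt_eq_pvG (lex n : Int) (hn : 1 ≤ n) :
    decodePerm_alt lex n = pvG (pvDseq lex 2 (n - 1).toNat) [0] := by
  dsimp only [decodePerm_alt]
  set k := (n - 1).toNat with hk
  have hr : n + 1 = 2 + (k : Int) := by omega
  rw [hr, pvDigitsFold k 2 lex [], List.nil_append]
  have heslen : (pvDseq lex 2 k).reverse.length = k := by simp
  have hbnd : ∀ (j : Nat) (hj : j < (pvDseq lex 2 k).reverse.length),
      0 ≤ (pvDseq lex 2 k).reverse[j] ∧
        (pvDseq lex 2 k).reverse[j] < ((PySem.List.pyRange 0 n 1).length : Int) - j := by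
    intro j hj
    rw [List.getElem_reverse]
    simp only [pvDseq_length]
    have hlj : j < k := by rwa [heslen] at hj
    have hds := pvDseqBounds k lex 2 le_rfl (k - 1 - j) (by omega)
    rw [PySem.List.length_pyRange_one,
      show (((n - 0).toNat : Nat) : Int) = n by omega]
    refine ⟨hds.1, ?_⟩
    have h2 := hds.2
    push_cast at h2 ⊢
    omega
  rw [pvFoldSel (pvDseq lex 2 k).reverse (PySem.List.pyRange 0 n 1) [] hbnd]
  rw [List.nil_append]
  rw [pvMain (pvDseq lex 2 k).reverse n (by rw [heslen]; omega) (by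
    intro j hj
    have := hbnd j hj
    rwa [PySem.List.length_pyRange_one, show (((n - 0).toNat : Nat) : Int) = n by omega] at this)]
  rw [List.reverse_reverse]

-- ===== VERDICT (by name: the statement is the Claim_ definition above) =====
theorem decodePerm_spec : Claim_equal_decodePerm := by
  intro lex n _
  unfold Spec_decodePerm
  by_cases hn : 1 ≤ n
  · rw [decodePerm_eq_pvG lex n hn, decodePerm_alt_eq_pvG lex n hn]
  · -- n ≤ 0: both programs return []
    dsimp only [decodePerm, decodePerm_alt]
    rw [PySem.List.pyRange_one_eq_nil (show n ≤ 0 by omega)]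
    rw [PySem.List.pyRange_one_eq_nil (show n + 1 ≤ 2 by omega)]
    rw [pvOuterA, dif_neg (by omega)]
    simp
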